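-- pv_equiv track=rewrite | github.com/kunalreddy126624/CloudSizer | app/noodle/runtime.py | _collect_ancestor_ids
-- ===== SOURCE A (Python) =====
-- def _collect_ancestor_ids(node_id: str, upstream_map: dict[str, list[str]]) -> set[str]:
--     visited: set[str] = set()
--     stack = list(upstream_map.get(node_id, []))
--     while stack:
--         current = stack.pop()
--         if current in visited:
--             continue
--         visited.add(current)
--         stack.extend(upstream_map.get(current, []))
--     return visited
-- ===== SOURCE B (Python) =====
-- def _collect_ancestor_ids(node_id: str, upstream_map: dict[str, list[str]]) -> set[str]:
--     visited: set[str] = set()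
--
--     def dfs(cur: str) -> None:
--         if cur in visited:
--             return
--         visited.add(cur)
--         for nxt in reversed(upstream_map.get(cur, [])):
--             dfs(nxt)
--
--     for child in reversed(upstream_map.get(node_id, [])):
--         dfs(child)
--     return visited
-- ===== Notes on version B (the rewrite author's own statement) =====
-- stated objective: alternative
-- what changed: Replaces the explicit work-stack loop (pop, visited check, extend) with a recursive depth-first helper that marks nodes before recursing into their parents, seeded from node_id's direct parents.
import Mathlib
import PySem

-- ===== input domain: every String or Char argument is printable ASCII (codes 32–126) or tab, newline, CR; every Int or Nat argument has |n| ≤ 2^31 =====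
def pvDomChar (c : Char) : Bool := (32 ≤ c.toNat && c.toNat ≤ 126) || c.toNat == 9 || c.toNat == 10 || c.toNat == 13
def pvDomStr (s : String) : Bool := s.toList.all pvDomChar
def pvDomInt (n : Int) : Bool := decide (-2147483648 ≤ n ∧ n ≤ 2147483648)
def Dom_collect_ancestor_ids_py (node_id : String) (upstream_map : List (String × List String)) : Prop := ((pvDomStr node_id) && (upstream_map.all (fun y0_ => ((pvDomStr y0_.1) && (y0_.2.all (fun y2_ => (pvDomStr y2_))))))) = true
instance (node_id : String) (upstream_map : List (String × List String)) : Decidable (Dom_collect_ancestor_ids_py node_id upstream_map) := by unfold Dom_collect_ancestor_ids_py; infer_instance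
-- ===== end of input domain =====

-- B replaces A's explicit work-stack loop with a recursive depth-first helper (same asymptotic cost);
-- the proved equivalence is about the returned visited set (neither version mutates its arguments).

-- ===== PORT A =====
-- upstream_map.get(k, []): first-match association-list lookup (exact for a Python dict, whose keys are unique)
def pvGet (m : List (String × List String)) (k : String) : List String :=
  match m with
  | [] => []
  | (k', v) :: r => if k' == k then v else pvGet r k

-- fuel bound for the while-loop (a totality guard only: the proof shows it is never exhausted)
def pvPot (m : List (String × List String)) (v : List String) : Nat :=
  match m with
  | [] => 0
  | (k, l) :: r => (if v.contains k then 0 else l.length + 1) + pvPot r v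

-- the 'while stack:' loop of A: pop the last element, skip if visited, else mark and extend
def pvLoopA (m : List (String × List String)) : Nat → List String → PySem.Set String → PySem.Set String
  | 0, _, visited => visited
  | f + 1, stack, visited =>
    match PySem.List.pop? stack (-1) with
    | none => visited
    | some (current, rest) =>
      if PySem.Set.contains visited current then pvLoopA m f rest visited
      else pvLoopA m f (rest ++ pvGet m current) (PySem.Set.add visited current)

def collect_ancestor_ids_py (node_id : String) (upstream_map : List (String × List String)) : List String :=
  let stack := pvGet upstream_map node_id
  pvLoopA upstream_map (stack.length + pvPot upstream_map []) stack PySem.Set.empty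

-- ===== PORT B =====
-- dfs(cur): skip if visited, else mark cur and recurse into reversed(upstream_map.get(cur, []))
-- (fuel is a totality guard only; the proof shows the chosen bound is never exhausted)
def pvDfsB (m : List (String × List String)) : Nat → String → PySem.Set String → PySem.Set String
  | 0, _, visited => visited
  | f + 1, cur, visited =>
    if PySem.Set.contains visited cur then visited
    else ((pvGet m cur).reverse).foldl (fun vis nxt => pvDfsB m f nxt vis) (PySem.Set.add visited cur)

def collect_ancestor_ids_py_alt (node_id : String) (upstream_map : List (String × List String)) : List String :=
  ((pvGet upstream_map node_id).reverse).foldl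
    (fun vis child => pvDfsB upstream_map (pvPot upstream_map [] + 1) child vis) PySem.Set.empty

-- ===== PRECONDITION & SPEC =====
def Spec_collect_ancestor_ids_py (node_id : String) (upstream_map : List (String × List String)) (out : List String) : Prop := out = collect_ancestor_ids_py_alt node_id upstream_map
instance (node_id : String) (upstream_map : List (String × List String)) (out : List String) : Decidable (Spec_collect_ancestor_ids_py node_id upstream_map out) := by unfold Spec_collect_ancestor_ids_py; infer_instance

-- ===== CLAIM (what is proved, stated in full; the proofs are below) =====
def Claim_equal_collect_ancestor_ids_py : Prop := ∀ (node_id : String) (upstream_map : List (String × List String)), Dom_collect_ancestor_ids_py node_id upstream_map → Spec_collect_ancestor_ids_py node_id upstream_map (collect_ancestor_ids_py node_id upstream_map)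

-- ===== LEMMAS AND PROOFS =====

-- canonical fuelled list-DFS both ports are reduced to
def pvSeq (m : List (String × List String)) : Nat → List String → PySem.Set String → PySem.Set String
  | 0, _, v => v
  | _ + 1, [], v => v
  | f + 1, c :: cs, v =>
    if v.contains c then pvSeq m f cs v
    else pvSeq m f ((pvGet m c).reverse ++ cs) (PySem.Set.add v c)

theorem pvSeq_nil (m : List (String × List String)) (f : Nat) (v : PySem.Set String) :
    pvSeq m f [] v = v := by cases f <;> rfl

theorem pvPot_mono (m : List (String × List String)) (v w : List String) :
    pvPot m (v ++ w) ≤ pvPot m v := by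
  induction m with
  | nil => simp [pvPot]
  | cons p r ih =>
    obtain ⟨k, l⟩ := p
    simp only [pvPot]
    by_cases h3 : k ∈ v
    · have e1 : (v ++ w).contains k = true := by simp [h3]
      have e2 : v.contains k = true := by simp [h3]
      rw [e1, e2]; simpa using ih
    · have e2 : v.contains k = false := by simp [h3]
      rw [e2]
      simp only [Bool.false_eq_true, if_false]
      have hb : (if (v ++ w).contains k = true then 0 else l.length + 1) ≤ l.length + 1 := by
        split <;> omega
      omega

theorem pvPot_add (m : List (String × List String)) (v : List String) (c : String)
    (hc : v.contains c = false) :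
    pvPot m (v ++ [c]) + (pvGet m c).length ≤ pvPot m v := by
  induction m with
  | nil => simp [pvPot, pvGet]
  | cons p r ih =>
    obtain ⟨k, l⟩ := p
    by_cases hk : k = c
    · subst hk
      have e1 : (v ++ [k]).contains k = true := by simp
      have h2 := pvPot_mono r v [k]
      have eg : pvGet ((k, l) :: r) k = l := by simp [pvGet]
      rw [eg]
      simp only [pvPot]
      rw [e1, hc]
      simp
      omega
    · have eg : pvGet ((k, l) :: r) c = pvGet r c := by simp [pvGet, hk]
      rw [eg]
      simp only [pvPot]
      by_cases h3 : k ∈ v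
      · have e1 : (v ++ [c]).contains k = true := by simp [h3]
        have e2 : v.contains k = true := by simp [h3]
        rw [e1, e2]
        simp
        omega
      · have e1 : (v ++ [c]).contains k = false := by simp [List.mem_append, h3, hk]
        have e2 : v.contains k = false := by simp [h3]
        rw [e1, e2]
        have := ih
        simp
        omega

-- the loop state only grows (as a list: the old visited is a prefix)
theorem pvSet_add_eq (v : PySem.Set String) (c : String) (h : c ∉ v) :
    PySem.Set.add v c = v ++ [c] := by
  simp [PySem.Set.add, PySem.Set.contains, h]

theorem pvSeq_prefix (m : List (String × List String)) (f : Nat) :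
    ∀ (cs : List String) (v : PySem.Set String), ∃ w, pvSeq m f cs v = v ++ w := by
  induction f with
  | zero => exact fun cs v => ⟨[], by simp [pvSeq]⟩
  | succ f ih =>
    intro cs v
    cases cs with
    | nil => exact ⟨[], by simp [pvSeq]⟩
    | cons c cs =>
      by_cases h : c ∈ v
      · simpa [pvSeq, h] using ih cs v
      · obtain ⟨w, hw⟩ := ih ((pvGet m c).reverse ++ cs) (PySem.Set.add v c)
        refine ⟨c :: w, ?_⟩
        rw [pvSet_add_eq v c h] at hw
        simp [pvSeq, h, hw]

theorem pvPot_pvSeq_le (m : List (String × List String)) (f : Nat) (cs : List String)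
    (v : PySem.Set String) : pvPot m (pvSeq m f cs v) ≤ pvPot m v := by
  obtain ⟨w, hw⟩ := pvSeq_prefix m f cs v
  rw [hw]; exact pvPot_mono m v w

-- one-step unfoldings of pvSeq
theorem pvSeq_cons_mem (m : List (String × List String)) (f : Nat) (cs : List String)
    (v : PySem.Set String) (c : String) (h : v.contains c = true) :
    pvSeq m (f + 1) (c :: cs) v = pvSeq m f cs v := by
  have hm : c ∈ v := by simpa using h
  simp [pvSeq, hm]

theorem pvSeq_cons_not_mem (m : List (String × List String)) (f : Nat) (cs : List String)
    (v : PySem.Set String) (c : String) (h : v.contains c = false) :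
    pvSeq m (f + 1) (c :: cs) v
      = pvSeq m f ((pvGet m c).reverse ++ cs) (PySem.Set.add v c) := by
  have hnm : c ∉ v := by simpa using h
  simp [pvSeq, hnm]

-- fuel irrelevance beyond the bound
theorem pvSeq_stable (m : List (String × List String)) :
    ∀ (f g : Nat) (cs : List String) (v : PySem.Set String),
      cs.length + pvPot m v ≤ f → cs.length + pvPot m v ≤ g →
      pvSeq m f cs v = pvSeq m g cs v := by
  intro f
  induction f with
  | zero =>
    intro g cs v hf _
    have : cs = [] := by cases cs <;> simp_all
    subst this; simp [pvSeq_nil]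
  | succ f ih =>
    intro g cs v hf hg
    cases cs with
    | nil => simp [pvSeq_nil]
    | cons c cs =>
      cases g with
      | zero => simp at hg
      | succ g =>
        simp only [List.length_cons] at hf hg
        cases h : v.contains c with
        | true =>
          rw [pvSeq_cons_mem m f cs v c h, pvSeq_cons_mem m g cs v c h]
          exact ih g cs v (by omega) (by omega)
        | false =>
          have hnm : c ∉ v := by simpa using h
          have hdrop := pvPot_add m v c h
          have hlen : ((pvGet m c).reverse ++ cs).length = (pvGet m c).length + cs.length := by
            simp
          have hbnd : ((pvGet m c).reverse ++ cs).length + pvPot m (PySem.Set.add v c)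
              ≤ cs.length + pvPot m v := by
            rw [pvSet_add_eq v c hnm, hlen]; omega
          rw [pvSeq_cons_not_mem m f cs v c h, pvSeq_cons_not_mem m g cs v c h]
          exact ih g _ _ (by omega) (by omega)

-- normal form: pvSeq with exactly enough fuel
def pvDS (m : List (String × List String)) (cs : List String) (v : PySem.Set String) :
    PySem.Set String := pvSeq m (cs.length + pvPot m v) cs v

-- A's stack loop is the canonical DFS on the reversed stack
theorem pvLoopA_eq_pvSeq (m : List (String × List String)) :
    ∀ (f : Nat) (stack : List String) (v : PySem.Set String),
      pvLoopA m f stack v = pvSeq m f stack.reverse v := by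
  intro f
  induction f with
  | zero => intro stack v; rfl
  | succ f ih =>
    intro stack v
    rcases stack.eq_nil_or_concat with rfl | ⟨ys, y, rfl⟩
    · rfl
    · have hpop : PySem.List.pop? (ys ++ [y]) (-1) = some (y, ys) := by
        simp [PySem.List.pop?_last]
      have hrev : (ys ++ [y]).reverse = y :: ys.reverse := by simp
      simp only [List.concat_eq_append]
      cases h : v.contains y with
      | true =>
        have hm : y ∈ v := by simpa using h
        rw [hrev, pvSeq_cons_mem m f ys.reverse v y h]
        simp [pvLoopA, hpop, hm, ih]
      | false =>
        have hnm : y ∉ v := by simpa using h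
        rw [hrev, pvSeq_cons_not_mem m f ys.reverse v y h]
        simp [pvLoopA, hpop, hnm, ih]

-- splitting the canonical DFS at an append
theorem pvSeq_append (m : List (String × List String)) :
    ∀ (f : Nat) (xs ys : List String) (v : PySem.Set String),
      xs.length + pvPot m v ≤ f →
      pvSeq m (f + ys.length) (xs ++ ys) v = pvDS m ys (pvSeq m f xs v) := by
  intro f
  induction f with
  | zero =>
    intro xs ys v hf
    have hx : xs = [] := by cases xs <;> simp_all
    have hp : pvPot m v = 0 := by omega
    subst hx
    simp only [pvSeq, List.nil_append, pvDS, hp, Nat.add_zero, Nat.zero_add]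
  | succ f ih =>
    intro xs ys v hf
    cases xs with
    | nil =>
      simp only [List.nil_append, pvSeq_nil, pvDS]
      exact pvSeq_stable m (f + 1 + ys.length) (ys.length + pvPot m v) ys v
        (by simp at hf; omega) (by omega)
    | cons c xs =>
      simp only [List.length_cons] at hf
      have hstep : f + 1 + ys.length = (f + ys.length) + 1 := by omega
      rw [hstep, List.cons_append]
      cases h : v.contains c with
      | true =>
        rw [pvSeq_cons_mem m (f + ys.length) (xs ++ ys) v c h,
          pvSeq_cons_mem m f xs v c h]
        exact ih xs ys v (by omega)
      | false =>
        have hnm : c ∉ v := by simpa using h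
        have hdrop := pvPot_add m v c h
        rw [pvSeq_cons_not_mem m (f + ys.length) (xs ++ ys) v c h,
          pvSeq_cons_not_mem m f xs v c h, ← List.append_assoc]
        exact ih ((pvGet m c).reverse ++ xs) ys (PySem.Set.add v c)
          (by rw [pvSet_add_eq v c hnm]; simp; omega)

-- B's recursive dfs folded over a list is the canonical DFS
theorem pvDfsB_fold_eq (m : List (String × List String)) :
    ∀ (d : Nat) (cs : List String) (v : PySem.Set String),
      pvPot m v < d →
      cs.foldl (fun a c => pvDfsB m d c a) v = pvDS m cs v := by
  intro d
  induction d with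
  | zero => intro cs v h; omega
  | succ d ihd =>
    intro cs
    induction cs with
    | nil => intro v _; simp [pvDS, pvSeq_nil]
    | cons c cs ihc =>
      intro v hv
      have hstep : (c :: cs).length + pvPot m v = (cs.length + pvPot m v) + 1 := by
        rw [List.length_cons]; omega
      cases h : v.contains c with
      | true =>
        have hm : c ∈ v := by simpa using h
        have hB : pvDfsB m (d + 1) c v = v := by
          simp [pvDfsB, PySem.Set.contains, hm]
        have hRHS : pvDS m (c :: cs) v = pvDS m cs v := by
          simp only [pvDS, hstep]
          exact pvSeq_cons_mem m _ cs v c h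
        simp only [List.foldl_cons, hB, hRHS]
        exact ihc v hv
      | false =>
        have hnm : c ∉ v := by simpa using h
        have hdrop := pvPot_add m v c h
        have hadd := pvSet_add_eq v c hnm
        cases hch : pvGet m c with
        | nil =>
          have hB : pvDfsB m (d + 1) c v = PySem.Set.add v c := by
            simp [pvDfsB, PySem.Set.contains, hnm, hch]
          have hvle : pvPot m (PySem.Set.add v c) < d + 1 := by
            rw [hadd]; have := pvPot_mono m v [c]; omega
          have hRHS : pvDS m (c :: cs) v = pvDS m cs (PySem.Set.add v c) := by
            simp only [pvDS, hstep]
            rw [pvSeq_cons_not_mem m _ cs v c h, hch]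
            simp only [List.reverse_nil, List.nil_append]
            exact pvSeq_stable m _ _ cs (PySem.Set.add v c)
              (by rw [hadd]; have := pvPot_mono m v [c]; omega) (le_refl _)
          simp only [List.foldl_cons, hB, hRHS]
          exact ihc (PySem.Set.add v c) hvle
        | cons e es =>
          have hlen : 1 ≤ (pvGet m c).length := by rw [hch]; simp
          have hlt : pvPot m (PySem.Set.add v c) < d := by rw [hadd] at *; omega
          have hB : pvDfsB m (d + 1) c v
              = pvDS m ((pvGet m c).reverse) (PySem.Set.add v c) := by
            have hu : pvDfsB m (d + 1) c v = ((pvGet m c).reverse).foldl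
                (fun vis nxt => pvDfsB m d nxt vis) (PySem.Set.add v c) := by
              simp [pvDfsB, PySem.Set.contains, hnm]
            rw [hu]
            exact ihd ((pvGet m c).reverse) (PySem.Set.add v c) hlt
          have hpot₁ : pvPot m (pvDS m ((pvGet m c).reverse) (PySem.Set.add v c))
              ≤ pvPot m (PySem.Set.add v c) := pvPot_pvSeq_le m _ _ _
          have hRHS : pvDS m (c :: cs) v
              = pvDS m cs (pvDS m ((pvGet m c).reverse) (PySem.Set.add v c)) := by
            simp only [pvDS, hstep]
            rw [pvSeq_cons_not_mem m _ cs v c h]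
            have h3 : pvSeq m (cs.length + pvPot m v) ((pvGet m c).reverse ++ cs)
                  (PySem.Set.add v c)
                = pvSeq m (((pvGet m c).reverse.length + pvPot m (PySem.Set.add v c))
                    + cs.length) ((pvGet m c).reverse ++ cs) (PySem.Set.add v c) := by
              apply pvSeq_stable
              · rw [hadd] at *; simp; omega
              · simp; omega
            rw [h3, pvSeq_append m ((pvGet m c).reverse.length + pvPot m (PySem.Set.add v c))
              ((pvGet m c).reverse) cs (PySem.Set.add v c) (le_refl _)]
            rfl
          simp only [List.foldl_cons, hB, hRHS]
          exact ihc (pvDS m ((pvGet m c).reverse) (PySem.Set.add v c)) (by omega)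

-- ===== VERDICT (by name: the statement is the Claim_ definition above) =====
theorem collect_ancestor_ids_py_spec : Claim_equal_collect_ancestor_ids_py := by
  intro node_id m _
  unfold Spec_collect_ancestor_ids_py collect_ancestor_ids_py collect_ancestor_ids_py_alt
  have hA := pvLoopA_eq_pvSeq m ((pvGet m node_id).length + pvPot m []) (pvGet m node_id)
    PySem.Set.empty
  have hB := pvDfsB_fold_eq m (pvPot m [] + 1) ((pvGet m node_id).reverse) PySem.Set.empty
    (by show pvPot m [] < pvPot m [] + 1; omega)
  rw [hA, hB]
  show pvSeq m _ _ _ = pvDS m _ _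
  unfold pvDS
  congr 1
  simp [PySem.Set.empty]
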